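-- pv_equiv track=rewrite | github.com/sljhhy/MVTraj | dataloader.py | _split_duplicate_subseq
-- ===== SOURCE A (Python) =====
-- def _split_duplicate_subseq(opath_list,max_len):
--     length_list = []
--     subsequence = [opath_list[0]]
--     for i in range(0, len(opath_list)-1):
--         if opath_list[i] == opath_list[i+1]:
--             subsequence.append(opath_list[i])
--         else:
--             length_list.append(len(subsequence))
--             subsequence = [opath_list[i]]
--     length_list.append(len(subsequence))
--     return length_list + [0]*(max_len-len(length_list))
-- ===== SOURCE B (Python) =====
-- def _split_duplicate_subseq(opath_list, max_len):
--     n = len(opath_list)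
--     bounds = [i + 1 for i in range(n - 1) if opath_list[i] != opath_list[i + 1]]
--     pos = [0] + bounds + [n]
--     length_list = [pos[j + 1] - pos[j] for j in range(len(pos) - 1)]
--     return length_list + [0] * (max_len - len(length_list))
-- ===== Notes on version B (the rewrite author's own statement) =====
-- stated objective: alternative
-- what changed: Replaces A's growing-subsequence accumulator (materialising each run as a list to take its length) with a breakpoint decomposition: collect the indices where adjacent elements differ, then read the run lengths off as successive differences of the boundary positions.
import Mathlib
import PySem

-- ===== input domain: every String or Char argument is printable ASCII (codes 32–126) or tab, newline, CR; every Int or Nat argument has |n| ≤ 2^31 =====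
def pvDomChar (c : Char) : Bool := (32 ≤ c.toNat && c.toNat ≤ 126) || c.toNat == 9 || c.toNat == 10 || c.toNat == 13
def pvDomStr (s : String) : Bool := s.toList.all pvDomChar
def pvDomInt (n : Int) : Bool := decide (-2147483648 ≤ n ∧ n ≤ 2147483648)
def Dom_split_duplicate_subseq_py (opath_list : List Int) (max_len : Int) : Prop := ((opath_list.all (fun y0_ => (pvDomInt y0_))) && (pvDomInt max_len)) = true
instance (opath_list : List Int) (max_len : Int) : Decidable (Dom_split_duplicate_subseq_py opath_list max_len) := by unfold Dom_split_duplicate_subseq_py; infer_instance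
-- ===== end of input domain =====

-- B replaces A's run-accumulator loop with a breakpoint decomposition (boundary indices,
-- then successive differences); same cost, proved to return the same list on every
-- non-empty input (A raises IndexError on the empty list, B returns an all-zero padding).

-- ===== PORT A =====
def split_duplicate_subseq_py (opath_list : List Int) (max_len : Int) : List Int :=
  -- subsequence = [opath_list[0]] : Python raises IndexError on []; excluded by Pre_ (default 0 here)
  let st := (PySem.List.pyRange 0 ((opath_list.length : Int) - 1) 1).foldl
    (fun (st : List Int × List Int) i =>
      if PySem.List.pyGetD opath_list i 0 = PySem.List.pyGetD opath_list (i + 1) 0 then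
        (st.1, st.2 ++ [PySem.List.pyGetD opath_list i 0])
      else
        (st.1 ++ [(st.2.length : Int)], [PySem.List.pyGetD opath_list i 0]))
    ([], [PySem.List.pyGetD opath_list 0 0])
  let length_list := st.1 ++ [(st.2.length : Int)]
  length_list ++ List.replicate (max_len - (length_list.length : Int)).toNat 0

-- ===== PORT B =====
def split_duplicate_subseq_py_alt (opath_list : List Int) (max_len : Int) : List Int :=
  let n : Int := (opath_list.length : Int)
  -- bounds = [i+1 for i in range(n-1) if opath_list[i] != opath_list[i+1]]
  let bounds := (PySem.List.pyRange 0 (n - 1) 1).foldl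
    (fun (acc : List Int) i =>
      if PySem.List.pyGetD opath_list i 0 ≠ PySem.List.pyGetD opath_list (i + 1) 0 then
        acc ++ [i + 1]
      else acc) []
  let pos : List Int := [0] ++ bounds ++ [n]
  -- length_list = [pos[j+1] - pos[j] for j in range(len(pos)-1)]
  let length_list := (PySem.List.pyRange 0 ((pos.length : Int) - 1) 1).foldl
    (fun (acc : List Int) j =>
      acc ++ [PySem.List.pyGetD pos (j + 1) 0 - PySem.List.pyGetD pos j 0]) []
  length_list ++ List.replicate (max_len - (length_list.length : Int)).toNat 0

-- ===== PRECONDITION & SPEC =====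
-- Pre_ excludes only the empty list, on which A raises IndexError (opath_list[0]).
def Pre_split_duplicate_subseq_py (opath_list : List Int) (max_len : Int) : Prop :=
  opath_list ≠ []
instance (opath_list : List Int) (max_len : Int) : Decidable (Pre_split_duplicate_subseq_py opath_list max_len) := by unfold Pre_split_duplicate_subseq_py; infer_instance
def pvWitness_split_duplicate_subseq_py : List Int × Int := ([1, 1, 2], 5)

def Spec_split_duplicate_subseq_py (opath_list : List Int) (max_len : Int) (out : List Int) : Prop := out = split_duplicate_subseq_py_alt opath_list max_len
instance (opath_list : List Int) (max_len : Int) (out : List Int) : Decidable (Spec_split_duplicate_subseq_py opath_list max_len out) := by unfold Spec_split_duplicate_subseq_py; infer_instance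

-- ===== CLAIM (what is proved, stated in full; the proofs are below) =====
def Claim_equal_split_duplicate_subseq_py : Prop := ∀ (opath_list : List Int) (max_len : Int), Dom_split_duplicate_subseq_py opath_list max_len → Pre_split_duplicate_subseq_py opath_list max_len → Spec_split_duplicate_subseq_py opath_list max_len (split_duplicate_subseq_py opath_list max_len)
-- ===== LEMMAS AND PROOFS =====

-- run lengths of the list prev :: rest, the current run having length k so far
def runsAux (prev k : Int) : List Int → List Int
  | [] => [k]
  | y :: ys => if prev = y then runsAux y (k + 1) ys else k :: runsAux y 1 ys

-- boundary indices (1-based from offset s) of the list prev :: rest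
def bnds (prev s : Int) : List Int → List Int
  | [] => []
  | y :: ys => if prev ≠ y then (s + 1) :: bnds y (s + 1) ys else bnds y (s + 1) ys

-- successive differences
def dif : List Int → List Int
  | a :: b :: t => (b - a) :: dif (b :: t)
  | _ => []

lemma zip_tail_length (l : List Int) (hl : l ≠ []) :
    ((l.zip l.tail).length : Int) = (l.length : Int) - 1 := by
  cases l with
  | nil => simp at hl
  | cons a t => simp [List.length_zip]

lemma pyGetD_zip_tail (l : List Int) (i : Int) (h0 : 0 ≤ i)
    (h1 : i < ((l.zip l.tail).length : Int)) :
    PySem.List.pyGetD (l.zip l.tail) i ((0 : Int), (0 : Int)) =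
      (PySem.List.pyGetD l i 0, PySem.List.pyGetD l (i + 1) 0) := by
  have hz : (l.zip l.tail).length = l.length - 1 := by
    simp [List.length_zip, List.length_tail]
  have hiN : i.toNat < (l.zip l.tail).length := by omega
  have hil : i.toNat < l.length := by omega
  have hil1 : i.toNat + 1 < l.length := by omega
  rw [PySem.List.pyGetD_eq_getElem _ _ h0 h1,
      PySem.List.pyGetD_eq_getElem l (d := 0) h0 (by exact_mod_cast by omega),
      PySem.List.pyGetD_eq_getElem l (d := 0) (by omega) (by exact_mod_cast by omega)]
  have : (i + 1).toNat = i.toNat + 1 := by omega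
  simp [List.getElem_zip, List.getElem_tail, this]

-- a fold over range(len(l)-1) reading l[i], l[i+1] is a fold over adjacent pairs
lemma foldl_range_adj {β : Type} (l : List Int) (f : β → Int → Int → β) (init : β)
    (hl : l ≠ []) :
    (PySem.List.pyRange 0 ((l.length : Int) - 1) 1).foldl
      (fun st i => f st (PySem.List.pyGetD l i 0) (PySem.List.pyGetD l (i + 1) 0)) init
    = (l.zip l.tail).foldl (fun st p => f st p.1 p.2) init := by
  rw [← zip_tail_length l hl]
  rw [PySem.List.foldl_congr_mem _ _
      (fun st i => f st (PySem.List.pyGetD (l.zip l.tail) i ((0:Int),(0:Int))).1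
                        (PySem.List.pyGetD (l.zip l.tail) i ((0:Int),(0:Int))).2) init
      (by
        intro acc x hx
        rw [PySem.List.mem_pyRange_one] at hx
        simp [pyGetD_zip_tail l x hx.1 hx.2])]
  exact PySem.List.foldl_pyRange_zero_pyGetD' (l.zip l.tail) ((0:Int),(0:Int))
    (fun st p => f st p.1 p.2) init

-- the indexed variant: the fold also reads the index i (for the bounds comprehension)
lemma foldl_range_adj_idx {β : Type} (l : List Int) (f : β → Int → Int → Int → β) (init : β)
    (hl : l ≠ []) :
    (PySem.List.pyRange 0 ((l.length : Int) - 1) 1).foldl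
      (fun st i => f st i (PySem.List.pyGetD l i 0) (PySem.List.pyGetD l (i + 1) 0)) init
    = (PySem.List.enumerate (l.zip l.tail)).foldl (fun st q => f st q.1 q.2.1 q.2.2) init := by
  rw [← zip_tail_length l hl]
  rw [PySem.List.foldl_congr_mem _ _
      (fun st i => f st i (PySem.List.pyGetD (l.zip l.tail) i ((0:Int),(0:Int))).1
                          (PySem.List.pyGetD (l.zip l.tail) i ((0:Int),(0:Int))).2) init
      (by
        intro acc x hx
        rw [PySem.List.mem_pyRange_one] at hx
        simp [pyGetD_zip_tail l x hx.1 hx.2])]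
  rw [PySem.List.enumerate_eq_map_pyRange (l.zip l.tail) ((0:Int),(0:Int)), List.foldl_map]
  simp [PySem.List.len]

-- the three conversions, instantiated to the ports' literal loop bodies
lemma A_fold_conv (a : Int) (t : List Int) :
    (PySem.List.pyRange 0 (((a :: t).length : Int) - 1) 1).foldl
      (fun (st : List Int × List Int) i =>
        if PySem.List.pyGetD (a :: t) i 0 = PySem.List.pyGetD (a :: t) (i + 1) 0 then
          (st.1, st.2 ++ [PySem.List.pyGetD (a :: t) i 0])
        else
          (st.1 ++ [(st.2.length : Int)], [PySem.List.pyGetD (a :: t) i 0]))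
      ([], [PySem.List.pyGetD (a :: t) 0 0])
    = ((a :: t).zip (a :: t).tail).foldl
      (fun (st : List Int × List Int) p =>
        if p.1 = p.2 then (st.1, st.2 ++ [p.1])
        else (st.1 ++ [(st.2.length : Int)], [p.1]))
      ([], [PySem.List.pyGetD (a :: t) 0 0]) :=
  foldl_range_adj (a :: t)
    (fun st a b => if a = b then (st.1, st.2 ++ [a]) else (st.1 ++ [(st.2.length : Int)], [a]))
    _ (by simp)

lemma bounds_fold_conv (a : Int) (t : List Int) :
    (PySem.List.pyRange 0 (((a :: t).length : Int) - 1) 1).foldl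
      (fun (acc : List Int) i =>
        if PySem.List.pyGetD (a :: t) i 0 ≠ PySem.List.pyGetD (a :: t) (i + 1) 0 then acc ++ [i + 1]
        else acc) []
    = (PySem.List.enumerate ((a :: t).zip (a :: t).tail)).foldl
      (fun (acc : List Int) q => if q.2.1 ≠ q.2.2 then acc ++ [q.1 + 1] else acc) [] :=
  foldl_range_adj_idx (a :: t) (fun acc i a b => if a ≠ b then acc ++ [i + 1] else acc) [] (by simp)

lemma dif_fold_conv (a : Int) (t : List Int) :
    (PySem.List.pyRange 0 (((a :: t).length : Int) - 1) 1).foldl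
      (fun (acc : List Int) j =>
        acc ++ [PySem.List.pyGetD (a :: t) (j + 1) 0 - PySem.List.pyGetD (a :: t) j 0]) []
    = ((a :: t).zip (a :: t).tail).foldl (fun (acc : List Int) p => acc ++ [p.2 - p.1]) [] :=
  foldl_range_adj (a :: t) (fun acc a b => acc ++ [b - a]) [] (by simp)

-- characterisation of A's loop
lemma A_core (xs : List Int) : ∀ (x : Int) (acc sub : List Int),
    (((x :: xs).zip xs).foldl
      (fun (st : List Int × List Int) p =>
        if p.1 = p.2 then (st.1, st.2 ++ [p.1])
        else (st.1 ++ [(st.2.length : Int)], [p.1])) (acc, sub)).1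
    ++ [((((x :: xs).zip xs).foldl
      (fun (st : List Int × List Int) p =>
        if p.1 = p.2 then (st.1, st.2 ++ [p.1])
        else (st.1 ++ [(st.2.length : Int)], [p.1])) (acc, sub)).2.length : Int)]
    = acc ++ runsAux x (sub.length : Int) xs := by
  induction xs with
  | nil => intro x acc sub; simp [runsAux]
  | cons y ys ih =>
    intro x acc sub
    by_cases h : x = y
    · subst h
      simp only [List.zip_cons_cons, List.foldl_cons, runsAux, ite_true]
      simpa using ih x acc (sub ++ [x])
    · simp only [List.zip_cons_cons, List.foldl_cons, runsAux, if_neg h]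
      simpa using ih y (acc ++ [(sub.length : Int)]) [x]

-- characterisation of B's bounds comprehension
lemma B_bounds (rest : List Int) : ∀ (prev s : Int) (acc : List Int),
    (PySem.List.enumerate ((prev :: rest).zip rest) s).foldl
      (fun (acc : List Int) q => if q.2.1 ≠ q.2.2 then acc ++ [q.1 + 1] else acc) acc
    = acc ++ bnds prev s rest := by
  induction rest with
  | nil => intro prev s acc; simp [bnds, PySem.List.enumerate_nil]
  | cons y ys ih =>
    intro prev s acc
    rw [List.zip_cons_cons, PySem.List.enumerate_cons]
    by_cases h : prev = y
    · subst h
      simpa [bnds] using ih prev (s + 1) acc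
    · simpa [bnds, h] using ih y (s + 1) (acc ++ [s + 1])

-- the successive-differences comprehension over adjacent pairs is dif
lemma B_dif : ∀ (pos acc : List Int),
    (pos.zip pos.tail).foldl (fun (acc : List Int) p => acc ++ [p.2 - p.1]) acc
    = acc ++ dif pos := by
  intro pos
  induction pos with
  | nil => intro acc; simp [dif]
  | cons a t ih =>
    intro acc
    cases t with
    | nil => simp [dif]
    | cons b r =>
      rw [List.tail_cons, List.zip_cons_cons, List.foldl_cons]
      have := ih (acc ++ [b - a])
      rw [List.tail_cons] at this
      rw [this]
      simp [dif]

-- differences of the boundary positions are the run lengths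
lemma dif_bnds (xs : List Int) : ∀ (x s k : Int),
    dif ((s - k) :: (bnds x s xs ++ [s + 1 + (xs.length : Int)]))
    = runsAux x (k + 1) xs := by
  induction xs with
  | nil => intro x s k; simp [bnds, dif, runsAux]; ring
  | cons y ys ih =>
    intro x s k
    by_cases h : x = y
    · rw [bnds, if_neg (not_not_intro h), runsAux, if_pos h]
      have := ih y (s + 1) (k + 1)
      have e1 : s + 1 - (k + 1) = s - k := by ring
      have e2 : s + 1 + 1 + (ys.length : Int) = s + 1 + (((y :: ys).length : Int)) := by
        push_cast [List.length_cons]; ring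
      rw [e1, e2] at this
      exact this
    · rw [bnds, if_pos h, runsAux, if_neg h]
      have := ih y (s + 1) 0
      have e2 : s + 1 + 1 + (ys.length : Int) = s + 1 + (((y :: ys).length : Int)) := by
        push_cast [List.length_cons]; ring
      have e3 : s + 1 - 0 = s + 1 := by ring
      rw [e3, e2] at this
      rw [List.cons_append, dif, this]
      rw [show s + 1 - (s - k) = k + 1 by ring, show (0 : Int) + 1 = 1 by norm_num]

-- ===== VERDICT (by name: the statement is the Claim_ definition above) =====
theorem split_duplicate_subseq_py_spec : Claim_equal_split_duplicate_subseq_py := by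
  intro opath_list max_len _ hpre
  unfold Spec_split_duplicate_subseq_py
  obtain ⟨x, xs, rfl⟩ : ∃ x xs, opath_list = x :: xs := by
    cases opath_list with
    | nil => exact absurd rfl hpre
    | cons a t => exact ⟨a, t, rfl⟩
  simp only [split_duplicate_subseq_py, split_duplicate_subseq_py_alt]
  rw [A_fold_conv, bounds_fold_conv]
  rw [List.tail_cons, PySem.List.pyGetD_zero_cons]
  rw [B_bounds xs x 0 []]
  simp only [List.nil_append, List.cons_append]
  rw [dif_fold_conv, B_dif]
  have hA := A_core xs x [] [x]
  norm_num at hA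
  have hB := dif_bnds xs x 0 0
  rw [show (0 : Int) - 0 = 0 by norm_num,
      show (0 : Int) + 1 + (xs.length : Int) = (((x :: xs).length : Int)) by
        push_cast [List.length_cons]; ring,
      show (0 : Int) + 1 = 1 by norm_num] at hB
  rw [hA, List.nil_append, hB]
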